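-- pv_equiv track=rewrite | github.com/ksayee/programming_assignments | python/CodingExercises/LeetCode1207.py | LeetCode1207
-- ===== SOURCE A (Python) =====
-- import collections
--
-- def LeetCode1207(lst):
--
--     dict=collections.Counter(lst)
--
--     rev_dict={}
--
--     for key,val in dict.items():
--         if val not in rev_dict.keys():
--             rev_dict[val]=[]
--             rev_dict[val].append(key)
--         else:
--             return False
--     return True
-- ===== SOURCE B (Python) =====
-- def LeetCode1207(lst):
--     s = sorted(lst)
--     runs = []
--     run = 0
--     prev = 0
--     for v in s:
--         if run > 0 and v == prev:
--             run += 1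
--         else:
--             if run > 0:
--                 runs.append(run)
--             run = 1
--             prev = v
--     if run > 0:
--         runs.append(run)
--     while runs:
--         c, runs = runs[0], runs[1:]
--         if c in runs:
--             return False
--     return True
-- ===== Notes on version B (the rewrite author's own statement) =====
-- stated objective: alternative
-- what changed: Replaces the Counter plus reverse-dict membership loop by sort-then-scan: sort the list, collect run lengths of equal elements in one linear sweep (no dict or Counter at all), then check the run lengths pairwise distinct by a head-versus-tail scan.
import Mathlib
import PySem

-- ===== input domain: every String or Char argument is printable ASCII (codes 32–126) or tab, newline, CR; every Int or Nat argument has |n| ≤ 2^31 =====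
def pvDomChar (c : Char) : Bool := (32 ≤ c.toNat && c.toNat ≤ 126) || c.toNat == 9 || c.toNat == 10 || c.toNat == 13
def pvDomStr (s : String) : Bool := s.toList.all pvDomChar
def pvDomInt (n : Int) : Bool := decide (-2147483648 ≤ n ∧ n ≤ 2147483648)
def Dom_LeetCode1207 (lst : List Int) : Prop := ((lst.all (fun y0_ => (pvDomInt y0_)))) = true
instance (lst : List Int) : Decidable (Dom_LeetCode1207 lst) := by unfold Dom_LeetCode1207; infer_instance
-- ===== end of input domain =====

-- B replaces A's Counter plus reverse-dict membership loop by sort-then-scan: sort, collect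
-- run lengths in one sweep (no dict at all), then check them pairwise distinct (objective: alternative).

-- ===== PORT A =====
-- the 'for key,val in dict.items(): …' loop with its early 'return False'
def LeetCode1207_loopA : List (Int × Int) → PySem.Dict Int (List Int) → Bool
  | [], _ => true
  | (key, val) :: rest, rev_dict =>
    if !(rev_dict.keys.contains val) then
      -- rev_dict[val] = []; rev_dict[val].append(key)
      LeetCode1207_loopA rest ((rev_dict.insert val []).modify val [] (· ++ [key]))
    else false

def LeetCode1207 (lst : List Int) : Bool :=
  let dict := PySem.Dict.counter lst
  LeetCode1207_loopA dict.items PySem.Dict.empty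

-- ===== PORT B =====
-- one step of the 'for v in s' sweep over the sorted list; state = (runs, run, prev)
def LeetCode1207_stepB (st : List Int × Int × Int) (v : Int) : List Int × Int × Int :=
  if st.2.1 > 0 && v == st.2.2 then (st.1, st.2.1 + 1, st.2.2)
  else ((if st.2.1 > 0 then st.1 ++ [st.2.1] else st.1), 1, v)

-- the final 'while runs: c, runs = runs[0], runs[1:]; if c in runs: return False'
def LeetCode1207_checkB : List Int → Bool
  | [] => true
  | c :: rest => if rest.contains c then false else LeetCode1207_checkB rest

def LeetCode1207_alt (lst : List Int) : Bool :=
  let s := PySem.List.sorted lst (fun x => x) false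
  let st := s.foldl LeetCode1207_stepB ([], 0, 0)
  let runs := if st.2.1 > 0 then st.1 ++ [st.2.1] else st.1
  LeetCode1207_checkB runs

-- ===== PRECONDITION & SPEC =====
def Spec_LeetCode1207 (lst : List Int) (out : Bool) : Prop := out = LeetCode1207_alt lst
instance (lst : List Int) (out : Bool) : Decidable (Spec_LeetCode1207 lst out) := by unfold Spec_LeetCode1207; infer_instance

-- ===== CLAIM (what is proved, stated in full; the proofs are below) =====
def Claim_equal_LeetCode1207 : Prop := ∀ (lst : List Int), Dom_LeetCode1207 lst → Spec_LeetCode1207 lst (LeetCode1207 lst)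

-- ===== LEMMAS AND PROOFS =====

-- the frequency multiset both sides compute: counts of the distinct elements, in s's first-occurrence order
def pvGroups (s : List Int) : List Int := (PySem.Set.ofList s).map (fun k => (s.count k : Int))

-- ---------- A side ----------

-- A's loop, abstracted to the list of counts and the keys already seen
def pv_seenLoop : List Int → List Int → Bool
  | [], _ => true
  | v :: rest, seen => if v ∈ seen then false else pv_seenLoop rest (seen ++ [v])

theorem pv_loopA_eq_seenLoop (items : List (Int × Int)) (rev : PySem.Dict Int (List Int)) :
    LeetCode1207_loopA items rev = pv_seenLoop (items.map (·.2)) rev.keys := by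
  induction items generalizing rev with
  | nil => rfl
  | cons p rest ih =>
    obtain ⟨k, v⟩ := p
    simp only [LeetCode1207_loopA, List.map_cons, pv_seenLoop]
    by_cases hv : v ∈ rev.keys
    · simp [hv]
    · have hc : rev.contains v = false := by
        by_contra h
        exact hv ((PySem.Dict.contains_iff_mem_keys rev v).1 (by simpa using h))
      have hkeys : ((rev.insert v []).modify v [] (· ++ [k])).keys = rev.keys ++ [v] := by
        rw [PySem.Dict.keys_modify]
        have h1 : (rev.insert v ([] : List Int)).contains v = true :=
          PySem.Dict.contains_insert_self rev v []
        calc ((rev.insert v []).insert v (((rev.insert v []).getD v []) ++ [k])).keys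
            = (rev.insert v ([] : List Int)).keys :=
              PySem.Dict.keys_insert_of_contains _ _ h1
          _ = rev.keys ++ [v] := PySem.Dict.keys_insert_of_not_contains rev [] hc
      rw [if_neg hv]
      have hcv : rev.keys.contains v = false := by simpa using hv
      rw [hcv]
      simp only [Bool.not_false, if_true]
      rw [ih, hkeys]

theorem pv_seenLoop_eq_true_iff (vals seen : List Int) :
    pv_seenLoop vals seen = true ↔ vals.Nodup ∧ ∀ v ∈ vals, v ∉ seen := by
  induction vals generalizing seen with
  | nil => simp [pv_seenLoop]
  | cons v rest ih =>
    simp only [pv_seenLoop]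
    by_cases hv : v ∈ seen
    · simp [hv]
    · rw [if_neg hv, ih]
      simp only [List.nodup_cons, List.mem_cons]
      constructor
      · rintro ⟨hnd, hall⟩
        refine ⟨⟨fun hmem => by simpa [hmem] using hall v hmem, hnd⟩, ?_⟩
        rintro x (rfl | hx)
        · exact hv
        · have := hall x hx; simp at this; tauto
      · rintro ⟨⟨hvr, hnd⟩, hall⟩
        refine ⟨hnd, fun x hx => ?_⟩
        simp only [List.mem_append, List.mem_singleton]
        push Not
        exact ⟨hall x (Or.inr hx), fun h => hvr (h ▸ hx)⟩

theorem pvA_iff (lst : List Int) : LeetCode1207 lst = true ↔ (pvGroups lst).Nodup := by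
  show LeetCode1207_loopA (PySem.Dict.counter lst).items PySem.Dict.empty = true ↔ _
  rw [pv_loopA_eq_seenLoop, PySem.Dict.keys_empty, pv_seenLoop_eq_true_iff]
  have hvals : (PySem.Dict.counter lst).items.map (·.2) = pvGroups lst := by
    rw [PySem.Dict.items_counter, List.map_map]
    rfl
  rw [hvals]
  simp

-- ---------- B side ----------

theorem pv_checkB_iff (rs : List Int) : LeetCode1207_checkB rs = true ↔ rs.Nodup := by
  induction rs with
  | nil => simp [LeetCode1207_checkB]
  | cons c rest ih =>
    simp only [LeetCode1207_checkB, List.nodup_cons]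
    by_cases hc : c ∈ rest
    · simp [hc]
    · rw [if_neg (by simpa using hc), ih]
      simp [hc]

-- a foldl-add over elements already in the accumulator skips them
theorem pv_foldl_add_filter (xs : List Int) : ∀ (acc : List Int) (x : Int), x ∈ acc →
    xs.foldl PySem.Set.add acc = (xs.filter (· ≠ x)).foldl PySem.Set.add acc := by
  induction xs with
  | nil => intro acc x _; rfl
  | cons y t ih =>
    intro acc x hx
    by_cases hyx : y = x
    · subst hyx
      have : PySem.Set.add acc y = acc := by
        simp [PySem.Set.add, PySem.Set.contains, hx]
      simp only [List.foldl_cons, List.filter_cons, this]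
      rw [if_neg (by simp)]
      exact ih acc y hx
    · simp only [List.foldl_cons, List.filter_cons]
      rw [if_pos (by simp [hyx])]
      simp only [List.foldl_cons]
      refine ih _ x ?_
      simp [PySem.Set.add, PySem.Set.contains]
      split <;> simp [hx]

-- a foldl-add never touching x commutes with an x sitting at the accumulator's head
theorem pv_foldl_add_cons (xs : List Int) : ∀ (acc : List Int) (x : Int), (∀ y ∈ xs, y ≠ x) →
    xs.foldl PySem.Set.add (x :: acc) = x :: xs.foldl PySem.Set.add acc := by
  induction xs with
  | nil => intro acc x _; rfl
  | cons y t ih =>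
    intro acc x h
    have hyx : y ≠ x := h y (by simp)
    have hstep : PySem.Set.add (x :: acc) y = x :: PySem.Set.add acc y := by
      simp only [PySem.Set.add, PySem.Set.contains]
      have h2 : (x :: acc).contains y = acc.contains y := by simp [hyx]
      simp only [h2]
      split <;> simp
    simp only [List.foldl_cons, hstep]
    exact ih _ x (fun z hz => h z (by simp [hz]))

theorem pv_ofList_cons (x : Int) (xs : List Int) :
    PySem.Set.ofList (x :: xs) = x :: PySem.Set.ofList (xs.filter (· ≠ x)) := by
  have h1 : PySem.Set.ofList (x :: xs) = xs.foldl PySem.Set.add [x] := by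
    rw [PySem.Set.ofList_eq_foldl]
    simp [PySem.Set.add, PySem.Set.contains]
  have h2 : PySem.Set.ofList (xs.filter (· ≠ x)) = (xs.filter (· ≠ x)).foldl PySem.Set.add [] := by
    rw [PySem.Set.ofList_eq_foldl]
  rw [h1, h2, pv_foldl_add_filter xs [x] x (by simp)]
  refine pv_foldl_add_cons _ [] x ?_
  intro y hy
  have := List.of_mem_filter hy
  simpa using this

theorem pvGroups_cons (v : Int) (t : List Int) :
    pvGroups (v :: t) = ((v :: t).count v : Int) :: pvGroups (t.filter (· ≠ v)) := by
  unfold pvGroups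
  rw [pv_ofList_cons, List.map_cons]
  congr 1
  refine List.map_congr_left ?_
  intro k hk
  have hk' : k ∈ t.filter (· ≠ v) := (PySem.Set.mem_ofList _ k).1 hk
  have hkv : k ≠ v := by simpa using List.of_mem_filter hk'
  congr 1
  simp [List.count_filter, hkv, Ne.symm hkv]

-- the 'if run > 0: runs.append(run)' finalization after the sweep
def pvFin (st : List Int × Int × Int) : List Int :=
  if st.2.1 > 0 then st.1 ++ [st.2.1] else st.1

-- the sweep over a sorted tail, mid-run
theorem pv_foldB (s : List Int) (h : s.Pairwise (· ≤ ·)) :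
    ∀ (runs0 : List Int) (run prev : Int), 0 < run → (∀ y ∈ s, prev ≤ y) →
    pvFin (s.foldl LeetCode1207_stepB (runs0, run, prev)) =
      runs0 ++ (run + (s.count prev : Int)) :: pvGroups (s.filter (· ≠ prev)) := by
  induction s with
  | nil =>
    intro runs0 run prev hrun _
    simp [pvFin, pvGroups, hrun, PySem.Set.ofList]
  | cons v t ih =>
    rw [List.pairwise_cons] at h
    obtain ⟨hvt, ht⟩ := h
    intro runs0 run prev hrun hprev
    have hpv : prev ≤ v := hprev v (by simp)
    simp only [List.foldl_cons]
    by_cases hv : v = prev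
    · have hcond : LeetCode1207_stepB (runs0, run, prev) v = (runs0, run + 1, prev) := by
        simp [LeetCode1207_stepB, hv, hrun]
      rw [hcond, ih ht runs0 (run + 1) prev (by omega) (fun y hy => hprev y (by simp [hy]))]
      have h1 : (((v :: t).count prev : Nat) : Int) = (t.count prev : Int) + 1 := by
        simp [hv]
      have h2 : (v :: t).filter (fun x => decide (x ≠ prev)) =
          t.filter (fun x => decide (x ≠ prev)) := by simp [hv]
      rw [h1, h2]
      have h3 : run + 1 + (t.count prev : Int) = run + ((t.count prev : Int) + 1) := by ring
      rw [h3]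
    · have hcond : LeetCode1207_stepB (runs0, run, prev) v = (runs0 ++ [run], 1, v) := by
        simp [LeetCode1207_stepB, hv, hrun]
      rw [hcond, ih ht (runs0 ++ [run]) 1 v (by norm_num) hvt]
      have hallne : ∀ y ∈ v :: t, y ≠ prev := by
        intro y hy
        rcases List.mem_cons.1 hy with h1 | h1
        · exact h1 ▸ hv
        · have h2 := hvt y h1
          have h3 : prev ≠ v := fun e => hv e.symm
          omega
      have hcnt0 : (v :: t).count prev = 0 :=
        List.count_eq_zero.2 (fun hmem => hallne prev hmem rfl)
      have hfil : (v :: t).filter (fun x => decide (x ≠ prev)) = v :: t :=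
        List.filter_eq_self.2 (fun y hy => by simp [hallne y hy])
      rw [hcnt0, hfil, pvGroups_cons]
      have e2 : (((v :: t).count v : Nat) : Int) = 1 + (t.count v : Int) := by
        rw [List.count_cons_self]; push_cast; ring
      rw [e2]
      simp [List.append_assoc]

-- a fresh sweep over a whole sorted list yields exactly the group sizes
theorem pv_sweep (S : List Int) (hp : S.Pairwise (· ≤ ·)) :
    pvFin (S.foldl LeetCode1207_stepB ([], 0, 0)) = pvGroups S := by
  cases S with
  | nil => simp [pvFin, pvGroups, PySem.Set.ofList]
  | cons v t =>
    rw [List.pairwise_cons] at hp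
    simp only [List.foldl_cons]
    have hcond : LeetCode1207_stepB ([], 0, 0) v = ([], 1, v) := by
      simp [LeetCode1207_stepB]
    rw [hcond, pv_foldB t hp.2 [] 1 v (by norm_num) hp.1, pvGroups_cons]
    have e2 : (((v :: t).count v : Nat) : Int) = 1 + (t.count v : Int) := by
      rw [List.count_cons_self]; push_cast; ring
    rw [e2]
    simp

theorem pvB_iff (lst : List Int) :
    LeetCode1207_alt lst = true ↔ (pvGroups (PySem.List.sorted lst (fun x => x) false)).Nodup := by
  have hp : (PySem.List.sorted lst (fun x => x) false).Pairwise (· ≤ ·) := by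
    simpa using PySem.List.sorted_pairwise (xs := lst) (key := fun x => x)
  show LeetCode1207_checkB
      (pvFin ((PySem.List.sorted lst (fun x => x) false).foldl LeetCode1207_stepB ([], 0, 0))) = true ↔ _
  rw [pv_sweep _ hp, pv_checkB_iff]

-- ---------- linking the two ----------

theorem pvGroups_sorted_perm (lst : List Int) :
    (pvGroups (PySem.List.sorted lst (fun x => x) false)).Perm (pvGroups lst) := by
  have hperm : (PySem.List.sorted lst (fun x => x) false).Perm lst :=
    PySem.List.sorted_perm (xs := lst) (key := fun x => x) (rev := false)
  have hkeys : (PySem.Set.ofList (PySem.List.sorted lst (fun x => x) false)).Perm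
      (PySem.Set.ofList lst) := by
    rw [List.perm_ext_iff_of_nodup (PySem.Set.nodup_ofList _) (PySem.Set.nodup_ofList _)]
    intro a
    rw [PySem.Set.mem_ofList, PySem.Set.mem_ofList]
    exact hperm.mem_iff
  unfold pvGroups
  have hmap : (PySem.Set.ofList (PySem.List.sorted lst (fun x => x) false)).map
        (fun k => ((PySem.List.sorted lst (fun x => x) false).count k : Int)) =
      (PySem.Set.ofList (PySem.List.sorted lst (fun x => x) false)).map
        (fun k => (lst.count k : Int)) := by
    refine List.map_congr_left ?_
    intro k _
    congr 1
    exact hperm.count_eq k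
  rw [hmap]
  exact hkeys.map _

-- ===== VERDICT (by name: the statement is the Claim_ definition above) =====
theorem LeetCode1207_spec : Claim_equal_LeetCode1207 := by
  intro lst _
  show LeetCode1207 lst = LeetCode1207_alt lst
  have hA := pvA_iff lst
  have hB := pvB_iff lst
  have hperm := (pvGroups_sorted_perm lst).nodup_iff
  rw [Bool.eq_iff_iff, hA, hB, hperm]
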